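-- pv_equiv track=rewrite | github.com/KingWitherBrine/py | other/python/cowvid_19_I_me_write.py | smallest_distance
-- ===== SOURCE A (Python) =====
-- def smallest_distance(s):
--   distance, current_start = len(s) - 1, -1
--   for i in range(len(s)):
--     if s[i] == "1":
--       if current_start != -1:
--         distance = min(distance, i-current_start)
--       current_start = i
--   return distance
-- ===== SOURCE B (Python) =====
-- def smallest_distance(s):
--   parts = s.split("1")
--   if len(parts) < 3:
--     return len(s) - 1
--   return 1 + min(len(p) for p in parts[1:-1])
-- ===== Notes on version B (the rewrite author's own statement) =====
-- stated objective: faster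
-- what changed: Replaces the index-tracking scan (distance, current_start) with a split-based formulation: split the string on '1' and return 1 + the minimum length of the inner parts (len(s)-1 when fewer than two '1's occur); no character indices are computed.
import Mathlib
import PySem

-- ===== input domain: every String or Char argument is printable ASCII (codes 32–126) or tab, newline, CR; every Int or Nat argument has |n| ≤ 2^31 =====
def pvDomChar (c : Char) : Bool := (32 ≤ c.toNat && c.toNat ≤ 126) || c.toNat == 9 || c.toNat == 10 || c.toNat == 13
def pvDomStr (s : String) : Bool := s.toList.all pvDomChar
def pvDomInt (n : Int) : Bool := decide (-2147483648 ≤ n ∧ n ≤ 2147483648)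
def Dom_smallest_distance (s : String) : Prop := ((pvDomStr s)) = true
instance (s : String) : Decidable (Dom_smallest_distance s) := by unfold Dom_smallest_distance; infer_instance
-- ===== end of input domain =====

-- B replaces A's index-tracking scan with a split-on-'1' formulation (objective: faster — a timing run measured B faster at the largest size; same O(n)).

-- ===== PORT A =====
-- for-loop over range(len(s)) with state (distance, current_start), reading s[i];
-- ported as a fold over the enumerated characters (i is always in range, so s[i] never raises)
def smallest_distance (s : String) : Int :=
  ((PySem.List.enumerate s.toList).foldl
    (fun (st : Int × Int) (p : Int × Char) =>
      if p.2 = '1' then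
        (if st.2 ≠ -1 then min st.1 (p.1 - st.2) else st.1, p.1)
      else st)
    ((s.toList.length : Int) - 1, -1)).1

-- ===== PORT B =====
-- parts = s.split("1"); fewer than 3 parts -> len(s)-1; else 1 + min inner part length.
-- (the [] match arm is unreachable: parts.length ≥ 3 makes parts[1:-1] nonempty)
def smallest_distance_alt (s : String) : Int :=
  let parts := PySem.Chars.splitOn s.toList ['1']
  if parts.length < 3 then (s.toList.length : Int) - 1
  else
    match (PySem.List.slice parts (some 1) (some (-1))).map (fun p => (p.length : Int)) with
    | [] => 0
    | x :: xs => 1 + xs.foldl min x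

-- ===== PRECONDITION & SPEC =====
def Spec_smallest_distance (s : String) (out : Int) : Prop := out = smallest_distance_alt s
instance (s : String) (out : Int) : Decidable (Spec_smallest_distance s out) := by unfold Spec_smallest_distance; infer_instance

-- ===== CLAIM (what is proved, stated in full; the proofs are below) =====
def Claim_equal_smallest_distance : Prop := ∀ (s : String), Dom_smallest_distance s → Spec_smallest_distance s (smallest_distance s)

-- ===== LEMMAS AND PROOFS =====

-- A's step function, restricted to the '1' positions
def pvG : Int × Int → Int → Int × Int :=
  fun st i => (if st.2 ≠ -1 then min st.1 (i - st.2) else st.1, i)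

-- positions of '1' in cs when enumeration starts at s
def pvPos (s : Int) (cs : List Char) : List Int :=
  ((PySem.List.enumerate cs s).filter (fun p => p.2 = '1')).map Prod.fst

-- consecutive differences
def pvDiffs (l : List Int) : List Int := (l.zip l.tail).map (fun p => p.2 - p.1)

-- simple recursive specification of splitting on the single character '1'
def pvSp : List Char → List (List Char)
  | [] => [[]]
  | c :: ys => if c = '1' then [] :: pvSp ys else (pvSp ys).modifyHead (c :: ·)

theorem pvSp_ne_nil (cs : List Char) : pvSp cs ≠ [] := by
  cases cs with
  | nil => simp [pvSp]
  | cons c ys =>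
    simp only [pvSp]
    split_ifs
    · simp
    · cases h : pvSp ys with
      | nil => exact absurd h (pvSp_ne_nil ys)
      | cons x xs => simp [List.modifyHead]

-- the fuel-based splitOn.go equals acc.reverse ++ (pvSp l with cur prepended to the head)
theorem pv_go_spec (fuel : Nat) (l cur : List Char) (acc : List (List Char))
    (hf : l.length < fuel) :
    PySem.Chars.splitOn.go ['1'] fuel l cur acc
      = acc.reverse ++ (pvSp l).modifyHead (cur.reverse ++ ·) := by
  induction fuel generalizing l cur acc with
  | zero => omega
  | succ fuel ih =>
    cases l with
    | nil => simp [PySem.Chars.splitOn.go, pvSp, List.modifyHead]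
    | cons c rest =>
      by_cases hc : c = '1'
      · subst hc
        have hpre : List.isPrefixOf ['1'] ('1' :: rest) = true := by
          simp [List.isPrefixOf]
        rw [PySem.Chars.splitOn.go]
        simp only [hpre, if_true, List.length_cons, List.length_nil, List.drop_succ_cons,
          List.drop_zero]
        rw [ih rest [] (cur.reverse :: acc) (by simpa using Nat.lt_of_succ_lt_succ hf)]
        cases h : pvSp rest with
        | nil => exact absurd h (pvSp_ne_nil rest)
        | cons x xs =>
          simp only [pvSp, h, List.modifyHead, List.reverse_cons,
            List.append_assoc, List.singleton_append, List.nil_append, List.reverse_nil]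
          simp [h.symm]
      · have hpre : List.isPrefixOf ['1'] (c :: rest) = false := by
          simp [List.isPrefixOf]; intro h; exact absurd h.symm hc
        rw [PySem.Chars.splitOn.go]
        simp only [hpre, Bool.false_eq_true, if_false]
        rw [ih rest (c :: cur) acc (by simpa using Nat.lt_of_succ_lt_succ hf)]
        cases h : pvSp rest with
        | nil => exact absurd h (pvSp_ne_nil rest)
        | cons x xs =>
          simp [pvSp, hc, h, List.modifyHead]

theorem pv_splitOn_eq (cs : List Char) :
    PySem.Chars.splitOn cs ['1'] = pvSp cs := by
  rw [PySem.Chars.splitOn, pv_go_spec cs.length.succ cs [] [] (Nat.lt_succ_self _)]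
  cases h : pvSp cs with
  | nil => exact absurd h (pvSp_ne_nil cs)
  | cons x xs => simp [List.modifyHead]

-- A's fold only changes state at '1' entries: it equals a fold of pvG over the positions
theorem pv_fold_filter (l : List (Int × Char)) (st : Int × Int) :
    l.foldl (fun (st : Int × Int) (p : Int × Char) =>
      if p.2 = '1' then
        (if st.2 ≠ -1 then min st.1 (p.1 - st.2) else st.1, p.1)
      else st) st
    = ((l.filter (fun p => p.2 = '1')).map Prod.fst).foldl pvG st := by
  induction l generalizing st with
  | nil => rfl
  | cons p l ih =>
    by_cases h : p.2 = '1'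
    · rw [List.foldl_cons, ih]
      simp [h, pvG]
    · rw [List.foldl_cons, ih]
      simp [h]

-- the fold of pvG from a started state computes the min of consecutive differences
theorem pv_fold_diffs (ps : List Int) (d q : Int) (hq : q ≠ -1)
    (hps : ∀ x ∈ ps, x ≠ -1) :
    (ps.foldl pvG (d, q)).1 = (pvDiffs (q :: ps)).foldl min d := by
  induction ps generalizing d q with
  | nil => rfl
  | cons r ps ih =>
    have hr : r ≠ -1 := hps r (by simp)
    have hps' : ∀ x ∈ ps, x ≠ -1 := fun x hx => hps x (by simp [hx])
    have step : pvG (d, q) r = (min d (r - q), r) := by simp [pvG, hq]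
    simp only [List.foldl_cons, step, ih (min d (r - q)) r hr hps',
      pvDiffs, List.zip_cons_cons, List.map_cons, List.tail_cons]

-- every position comes from enumerate: it lies in [0, len-1]
theorem pv_pos_bounds (cs : List Char) (x : Int)
    (hx : x ∈ pvPos 0 cs) :
    0 ≤ x ∧ x ≤ (cs.length : Int) - 1 := by
  rcases List.mem_map.1 hx with ⟨p, hp, rfl⟩
  have hp' : p ∈ PySem.List.enumerate cs := List.mem_of_mem_filter hp
  rcases (PySem.List.mem_enumerate_iff _ _ _).1 hp' with ⟨k, hk, rfl⟩
  constructor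
  · simp
  · simp only [Int.zero_add] at *
    omega

-- structural equations for pvPos
theorem pvPos_cons (s : Int) (c : Char) (ys : List Char) :
    pvPos s (c :: ys)
      = if c = '1' then s :: pvPos (s + 1) ys else pvPos (s + 1) ys := by
  by_cases h : c = '1' <;>
    simp [pvPos, PySem.List.enumerate_cons, h]

theorem pvDiffs_cons_cons (a b : Int) (l : List Int) :
    pvDiffs (a :: b :: l) = (b - a) :: pvDiffs (b :: l) := by
  simp [pvDiffs]

-- KEY LEMMA: inner lengths + 1 of the split = consecutive differences of (s-1 :: positions)
theorem pv_main (s : Int) (cs : List Char) :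
    ((pvSp cs).dropLast).map (fun p => (p.length : Int) + 1)
      = pvDiffs ((s - 1) :: pvPos s cs) := by
  induction cs generalizing s with
  | nil => simp [pvSp, pvPos, PySem.List.enumerate, pvDiffs]
  | cons c ys ih =>
    by_cases hc : c = '1'
    · subst hc
      rw [show pvSp ('1' :: ys) = [] :: pvSp ys from by simp [pvSp],
        pvPos_cons, if_pos rfl,
        List.dropLast_cons_of_ne_nil (pvSp_ne_nil ys), List.map_cons,
        pvDiffs_cons_cons]
      have ih1 := ih (s + 1)
      rw [show s + 1 - 1 = s from by ring] at ih1
      rw [ih1]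
      norm_num [show s - (s - 1) = 1 from by ring]
    · rw [show pvSp (c :: ys) = (pvSp ys).modifyHead (c :: ·) from by simp [pvSp, hc],
        pvPos_cons, if_neg hc]
      have ih1 := ih (s + 1)
      rw [show s + 1 - 1 = s from by ring] at ih1
      cases h : pvSp ys with
      | nil => exact absurd h (pvSp_ne_nil ys)
      | cons x xs =>
        rw [h] at ih1
        cases xs with
        | nil =>
          have hpos : pvPos (s + 1) ys = [] := by
            cases hp : pvPos (s + 1) ys with
            | nil => rfl
            | cons p ps =>
              rw [hp] at ih1
              simp [pvDiffs] at ih1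
          simp [hpos, List.modifyHead, pvDiffs]
        | cons y xs =>
          cases hp : pvPos (s + 1) ys with
          | nil =>
            rw [hp] at ih1
            rw [List.dropLast_cons_of_ne_nil (by simp)] at ih1
            simp [pvDiffs] at ih1
          | cons p ps =>
            rw [hp, pvDiffs_cons_cons] at ih1
            rw [List.dropLast_cons_of_ne_nil (by simp), List.map_cons] at ih1
            have hhead : (x.length : Int) + 1 = p - s := (List.cons.injEq _ _ _ _ ▸ ih1).1
            have htail := (List.cons.injEq _ _ _ _ ▸ ih1).2
            rw [List.modifyHead, List.dropLast_cons_of_ne_nil (by simp), List.map_cons,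
              pvDiffs_cons_cons, htail]
            congr 1
            simp only [List.length_cons]
            push_cast
            omega

theorem pv_slice_inner (xs : List (List Char)) (h : 1 ≤ xs.length) :
    PySem.List.slice xs (some 1) (some (-1)) = xs.tail.dropLast := by
  simp [PySem.List.slice]
  rw [Nat.min_eq_left h, List.drop_one, List.dropLast_eq_take, List.length_tail]

-- 1 + a running min = the running min of the (+1)-shifted list
theorem pv_add_one_foldl_min (l : List Int) (x : Int) :
    1 + l.foldl min x = (l.map (fun a => a + 1)).foldl min (x + 1) := by
  induction l generalizing x with
  | nil => simp; ring
  | cons a l ih =>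
    simp only [List.foldl_cons, List.map_cons]
    rw [ih]
    congr 1
    omega

-- the split has one more part than there are '1' positions
theorem pv_parts_length (cs : List Char) :
    (pvSp cs).length = (pvPos 0 cs).length + 1 := by
  have hm := congrArg List.length (pv_main 0 cs)
  simp only [List.length_map, List.length_dropLast, pvDiffs, List.length_zip,
    List.length_cons, List.tail_cons] at hm
  have hne := pvSp_ne_nil cs
  have h1 : 1 ≤ (pvSp cs).length := by
    cases h : pvSp cs with
    | nil => exact absurd h hne
    | cons x xs => simp
  omega

-- ===== VERDICT (by name: the statement is the Claim_ definition above) =====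
theorem smallest_distance_spec : Claim_equal_smallest_distance := by
  intro s _
  unfold Spec_smallest_distance smallest_distance smallest_distance_alt
  rw [pv_fold_filter]
  have hsp := pv_splitOn_eq s.toList
  rw [hsp]
  have hlenp := pv_parts_length s.toList
  have hmain := pv_main 0 s.toList
  have hbounds := pv_pos_bounds s.toList
  rw [show (0:Int) - 1 = -1 from by ring] at hmain
  match hmatch : pvPos 0 s.toList with
  | [] =>
    rw [hmatch] at hlenp
    simp only [pvPos] at hmatch
    rw [hmatch]
    simp [hlenp]
  | [q] =>
    rw [hmatch] at hlenp
    simp only [pvPos] at hmatch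
    rw [hmatch]
    simp [hlenp, pvG]
  | q :: r :: ps =>
    rw [hmatch] at hlenp hmain
    simp only [List.length_cons] at hlenp
    have hbq := hbounds q (by rw [hmatch]; simp)
    have hbr := hbounds r (by rw [hmatch]; simp)
    have hpsne : ∀ x ∈ (r :: ps), x ≠ -1 := by
      intro x hx
      have := hbounds x (by rw [hmatch]; exact List.mem_cons_of_mem _ hx)
      omega
    simp only [pvPos] at hmatch
    rw [hmatch]
    have hstep : List.foldl pvG ((s.toList.length : Int) - 1, -1) (q :: r :: ps)
        = List.foldl pvG ((s.toList.length : Int) - 1, q) (r :: ps) := by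
      simp [pvG]
    rw [hstep, pv_fold_diffs (r :: ps) _ q (by omega) hpsne]
    -- B side
    rw [if_neg (by omega), pv_slice_inner _ (by omega)]
    cases hparts : pvSp s.toList with
    | nil => exact absurd hparts (pvSp_ne_nil s.toList)
    | cons p0 rest =>
      rw [hparts] at hlenp hmain
      simp only [List.length_cons] at hlenp
      cases rest with
      | nil => simp only [List.length_nil] at hlenp; omega
      | cons p1 rest' =>
        rw [List.dropLast_cons_of_ne_nil (by simp), List.map_cons, pvDiffs_cons_cons] at hmain
        have htail := (List.cons.injEq _ _ _ _ ▸ hmain).2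
        simp only [List.tail_cons]
        cases hdl : (p1 :: rest').dropLast with
        | nil =>
          have h2 := congrArg List.length hdl
          simp only [List.length_dropLast, List.length_cons, List.length_nil] at h2 hlenp
          omega
        | cons y0 ys =>
          rw [hdl] at htail
          simp only [List.map_cons] at htail
          have hh : (y0.length : Int) + 1 = r - q := (List.cons.injEq _ _ _ _ ▸ htail).1
          have ht := (List.cons.injEq _ _ _ _ ▸ htail).2
          -- reduce the match on a literal cons
          show List.foldl min ((s.toList.length : Int) - 1) ((r - q) :: pvDiffs (r :: ps))
              = 1 + ((ys.map (fun p => (p.length : Int))).foldl min (y0.length : Int))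
          rw [pv_add_one_foldl_min, List.map_map]
          have hmapeq : ys.map ((fun a => a + 1) ∘ (fun p => (p.length : Int)))
              = ys.map (fun p => (p.length : Int) + 1) := by
            simp
          rw [hmapeq, hh, ht]
          simp only [List.foldl_cons]
          congr 1
          omega
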